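-- pv_equiv track=rewrite | github.com/falco81/Utils | mujrozhlas_rss_gen.py | pick_audio
-- ===== SOURCE A (Python) =====
-- def pick_audio(attrs):
--     """(url, mime, length_bytes) - preferuje podtrac."""
--     links = attrs.get("audioLinks") or []
--     # podtrac URL
--     for src in links:
--         url = src.get("url", "")
--         if url and "podtrac.com" in url:
--             length = int(src.get("duration", 0) or 0)
--             # V API je 'duration' v sekundách, ne bajtech - length necháme 0,
--             # správné bajty zjistí --with-lengths režim nebo si je zjistí klient.
--             return url, src.get("mimeType", "audio/mpeg"), 0
--     # mp3 variant
--     for src in links: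
--         if src.get("variant") == "mp3" and src.get("url"):
--             return src["url"], src.get("mimeType", "audio/mpeg"), 0
--     # cokoli
--     for src in links:
--         if src.get("url"):
--             return src["url"], src.get("mimeType", "audio/mpeg"), 0
--     return None, "audio/mpeg", 0
-- ===== SOURCE B (Python) =====
-- def pick_audio(attrs):
--     """(url, mime, length_bytes) - preferuje podtrac; jeden pruchod."""
--     links = attrs.get("audioLinks") or []
--     mp3 = best = None
--     for src in links:
--         url = src.get("url", "")
--         if url and "podtrac.com" in url:
--             return url, src.get("mimeType", "audio/mpeg"), 0
--         if mp3 is None and src.get("variant") == "mp3" and url: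
--             mp3 = (url, src.get("mimeType", "audio/mpeg"))
--         if best is None and url:
--             best = (url, src.get("mimeType", "audio/mpeg"))
--     cand = mp3 or best
--     if cand:
--         return cand[0], cand[1], 0
--     return None, "audio/mpeg", 0
-- ===== Notes on version B (the rewrite author's own statement) =====
-- stated objective: alternative
-- what changed: Three sequential scans over links (podtrac, then mp3, then any) are replaced by a single pass that returns at the first podtrac link and otherwise tracks the first mp3 candidate and the first any-url candidate; B also drops A's dead int(duration) conversion.
import Mathlib
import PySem

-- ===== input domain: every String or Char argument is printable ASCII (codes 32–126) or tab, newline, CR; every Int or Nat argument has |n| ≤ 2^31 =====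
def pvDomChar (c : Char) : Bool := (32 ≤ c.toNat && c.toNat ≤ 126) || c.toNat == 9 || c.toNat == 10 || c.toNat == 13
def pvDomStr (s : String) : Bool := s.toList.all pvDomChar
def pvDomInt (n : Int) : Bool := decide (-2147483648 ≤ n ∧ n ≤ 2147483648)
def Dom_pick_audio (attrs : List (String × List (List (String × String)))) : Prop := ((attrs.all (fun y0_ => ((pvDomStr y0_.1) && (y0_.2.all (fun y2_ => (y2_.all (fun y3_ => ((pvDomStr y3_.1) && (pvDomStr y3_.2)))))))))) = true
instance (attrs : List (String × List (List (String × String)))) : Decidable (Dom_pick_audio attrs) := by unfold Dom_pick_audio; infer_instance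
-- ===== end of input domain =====

-- B replaces A's three sequential scans by one pass with best-so-far candidates and drops
-- A's dead int(duration) call; inputs where that int() raises are outside Pre_pick_audio.

-- ===== PORT A =====
-- src.get(k, dflt) on a string dict
def pvGetD (src : List (String × String)) (k dflt : String) : String :=
  PySem.Dict.getD (PySem.Dict.mk src) k dflt

-- first scan: podtrac URL (the int() call is dead code in A; it can only raise, which
-- Pre_pick_audio excludes, so the port binds its parse result and ignores it)
def podScan : List (List (String × String)) → Option (Option String × String × Int)
  | [] => none
  | src :: rest =>
    let url := pvGetD src "url" ""
    if url ≠ "" ∧ PySem.Str.isIn "podtrac.com" url = true then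
      let _length : Option Int :=
        match PySem.Dict.get? (PySem.Dict.mk src) "duration" with
        | none => some 0
        | some s => if s = "" then some 0 else PySem.Int.ofStr? s
      some (some url, pvGetD src "mimeType" "audio/mpeg", 0)
    else podScan rest

-- second scan: mp3 variant
def mp3Scan : List (List (String × String)) → Option (String × String)
  | [] => none
  | src :: rest =>
    if PySem.Dict.get? (PySem.Dict.mk src) "variant" = some "mp3" ∧ pvGetD src "url" "" ≠ "" then
      some (pvGetD src "url" "", pvGetD src "mimeType" "audio/mpeg")
    else mp3Scan rest

-- third scan: anything with a url
def anyScan : List (List (String × String)) → Option (String × String)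
  | [] => none
  | src :: rest =>
    if pvGetD src "url" "" ≠ "" then
      some (pvGetD src "url" "", pvGetD src "mimeType" "audio/mpeg")
    else anyScan rest

def pick_audio (attrs : List (String × List (List (String × String)))) : Option String × String × Int :=
  let links := PySem.Dict.getD (PySem.Dict.mk attrs) "audioLinks" []
  match podScan links with
  | some r => r
  | none =>
    match mp3Scan links with
    | some (u, m) => (some u, m, 0)
    | none =>
      match anyScan links with
      | some (u, m) => (some u, m, 0)
      | none => (none, "audio/mpeg", 0)

-- ===== PORT B =====
-- one pass: return at the first podtrac link, else track first mp3 / first any candidates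
def altLoop : List (List (String × String)) → Option (String × String) → Option (String × String) → Option String × String × Int
  | [], mp3, best =>
    match mp3.orElse (fun _ => best) with
    | some (u, m) => (some u, m, 0)
    | none => (none, "audio/mpeg", 0)
  | src :: rest, mp3, best =>
    let url := pvGetD src "url" ""
    if url ≠ "" ∧ PySem.Str.isIn "podtrac.com" url = true then
      (some url, pvGetD src "mimeType" "audio/mpeg", 0)
    else
      let mp3' := if mp3 = none ∧ PySem.Dict.get? (PySem.Dict.mk src) "variant" = some "mp3" ∧ url ≠ "" then
          some (url, pvGetD src "mimeType" "audio/mpeg") else mp3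
      let best' := if best = none ∧ url ≠ "" then
          some (url, pvGetD src "mimeType" "audio/mpeg") else best
      altLoop rest mp3' best'

def pick_audio_alt (attrs : List (String × List (List (String × String)))) : Option String × String × Int :=
  altLoop (PySem.Dict.getD (PySem.Dict.mk attrs) "audioLinks" []) none none

-- ===== PRECONDITION & SPEC =====
-- Bool test for "this src is the podtrac link A returns at"
def podB (src : List (String × String)) : Bool :=
  (PySem.Dict.getD (PySem.Dict.mk src) "url" "" != "") && PySem.Str.isIn "podtrac.com" (PySem.Dict.getD (PySem.Dict.mk src) "url" "")

-- Pre_ excludes exactly the inputs where A raises ValueError: the first podtrac link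
-- carries a non-empty 'duration' string that int() cannot parse.
def preB (attrs : List (String × List (List (String × String)))) : Bool :=
  match (PySem.Dict.getD (PySem.Dict.mk attrs) "audioLinks" []).find? podB with
  | none => true
  | some src =>
    match PySem.Dict.get? (PySem.Dict.mk src) "duration" with
    | none => true
    | some s => s == "" || (PySem.Int.ofStr? s).isSome

def Pre_pick_audio (attrs : List (String × List (List (String × String)))) : Prop := preB attrs = true
instance (attrs : List (String × List (List (String × String)))) : Decidable (Pre_pick_audio attrs) := by unfold Pre_pick_audio; infer_instance

def pvWitness_pick_audio : (List (String × List (List (String × String)))) :=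
  [("audioLinks", [[("url", "http://dts.podtrac.com/x.mp3"), ("duration", "5")], [("url", "a"), ("variant", "mp3")]])]

def Spec_pick_audio (attrs : List (String × List (List (String × String)))) (out : Option String × String × Int) : Prop := out = pick_audio_alt attrs
instance (attrs : List (String × List (List (String × String)))) (out : Option String × String × Int) : Decidable (Spec_pick_audio attrs out) := by unfold Spec_pick_audio; infer_instance

-- ===== CLAIM (what is proved, stated in full; the proofs are below) =====
def Claim_equal_pick_audio : Prop := ∀ (attrs : List (String × List (List (String × String)))), Dom_pick_audio attrs → Pre_pick_audio attrs → Spec_pick_audio attrs (pick_audio attrs)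

-- ===== LEMMAS AND PROOFS =====
-- finish of B's loop expressed on two candidates
def finishCand (mp3 best : Option (String × String)) : Option String × String × Int :=
  match mp3.orElse (fun _ => best) with
  | some (u, m) => (some u, m, 0)
  | none => (none, "audio/mpeg", 0)

-- best-so-far tracking vs first-match scan: carrying the candidate commutes with <|>
theorem track_eq {α : Type} (m : Option α) (P : Prop) [Decidable P] (c : α) (t : Option α) :
    (if m = none ∧ P then some c else m).orElse (fun _ => t) =
      m.orElse (fun _ => if P then some c else t) := by
  cases m with
  | some x => simp [Option.orElse]
  | none => by_cases h : P <;> simp [Option.orElse, h]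

-- loop invariant: one pass with candidates = podtrac scan, else finish of the carried
-- candidates seeded with the remaining scans
theorem altLoop_eq (links : List (List (String × String))) :
    ∀ (mp3 best : Option (String × String)),
      altLoop links mp3 best =
        match podScan links with
        | some r => r
        | none => finishCand (mp3.orElse (fun _ => mp3Scan links)) (best.orElse (fun _ => anyScan links)) := by
  induction links with
  | nil => intro mp3 best; simp [altLoop, podScan, mp3Scan, anyScan, finishCand]
  | cons src rest ih =>
    intro mp3 best
    by_cases hpod : pvGetD src "url" "" ≠ "" ∧ PySem.Str.isIn "podtrac.com" (pvGetD src "url" "") = true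
    · simp only [altLoop, podScan, if_pos hpod]
    · simp only [altLoop, podScan, mp3Scan, anyScan, if_neg hpod, ih]
      cases podScan rest with
      | some r => rfl
      | none =>
        simp only []
        congr 1
        · exact track_eq mp3 _ _ _
        · exact track_eq best _ _ _

theorem pick_eq (attrs : List (String × List (List (String × String)))) :
    pick_audio attrs = pick_audio_alt attrs := by
  simp only [pick_audio, pick_audio_alt, altLoop_eq]
  cases podScan (PySem.Dict.getD (PySem.Dict.mk attrs) "audioLinks" []) with
  | some r => rfl
  | none =>
    simp only [finishCand, Option.orElse]
    cases mp3Scan (PySem.Dict.getD (PySem.Dict.mk attrs) "audioLinks" []) with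
    | some p => rfl
    | none =>
      cases anyScan (PySem.Dict.getD (PySem.Dict.mk attrs) "audioLinks" []) with
      | some p => rfl
      | none => rfl

-- ===== VERDICT (by name: the statement is the Claim_ definition above) =====
theorem pick_audio_spec : Claim_equal_pick_audio := by
  intro attrs _ _
  exact pick_eq attrs
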